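-- pv_equiv track=rewrite | github.com/loganv90/aoc-2015-python | day16/solution.py | contains_2
-- ===== SOURCE A (Python) =====
-- def contains_2(required_details: dict[str, int], details: dict[str, int]) -> bool:
--     for key, value in details.items():
--         if key not in required_details:
--             raise ValueError("Unknown key")
--
--         if key == "cats" or key == "trees":
--             if required_details[key] >= value:
--                 return False
--         elif key == "pomeranians" or key == "goldfish":
--             if required_details[key] <= value:
--                 return False
--         else:
--             if required_details[key] != value:
--                 return False
--
--     return True
-- ===== SOURCE B (Python) =====
-- def contains_2(required_details: dict[str, int], details: dict[str, int]) -> bool: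
--     # Staged checking: first validate every key at once via set difference (raise if any
--     # unknown), then check each category of constraints in its own filtered pass.
--     if details.keys() - required_details.keys():
--         raise ValueError("Unknown key")
--
--     low = {"cats", "trees"}               # required value must be strictly below the detail
--     high = {"pomeranians", "goldfish"}    # required value must be strictly above the detail
--
--     ok_low = all(required_details[k] < v for k, v in details.items() if k in low)
--     ok_high = all(required_details[k] > v for k, v in details.items() if k in high)
--     ok_eq = all(required_details[k] == v
--                 for k, v in details.items() if k not in low and k not in high)
--     return ok_low and ok_high and ok_eq
-- ===== Notes on version B (the rewrite author's own statement) =====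
-- stated objective: alternative
-- what changed: Replaces the single interleaved loop with early returns by staged passes: one set-difference validation of all keys up front, then three independent filtered all() passes (strict-lower keys, strict-upper keys, equality keys) combined with and.
-- outside the precondition, e.g. on contains_2({'cats': 5}, {'cats': 4, 'zz': 1}): A returns False, B raises ValueError
import Mathlib
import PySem

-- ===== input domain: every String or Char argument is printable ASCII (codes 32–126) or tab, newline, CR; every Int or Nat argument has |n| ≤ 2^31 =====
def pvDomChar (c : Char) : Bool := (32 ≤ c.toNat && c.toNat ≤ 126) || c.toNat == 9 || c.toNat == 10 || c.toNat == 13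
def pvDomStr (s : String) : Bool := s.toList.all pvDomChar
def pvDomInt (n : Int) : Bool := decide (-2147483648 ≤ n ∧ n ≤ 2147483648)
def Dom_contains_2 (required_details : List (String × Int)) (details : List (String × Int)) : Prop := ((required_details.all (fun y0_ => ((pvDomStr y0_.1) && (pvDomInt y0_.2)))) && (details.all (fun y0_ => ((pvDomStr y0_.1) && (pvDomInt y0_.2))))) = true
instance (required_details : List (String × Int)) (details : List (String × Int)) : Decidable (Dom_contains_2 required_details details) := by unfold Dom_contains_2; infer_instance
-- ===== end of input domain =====

-- B replaces A's single interleaved loop (early return / raise per item) by staged passes: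
-- set-difference key validation up front, then three independent filtered all() passes
-- combined with `and` (alternative decomposition; same cost).


-- ===== PORT A =====
def contains_2 (required_details : List (String × Int)) (details : List (String × Int)) : Bool :=
  match details with
  | [] => true
  | (key, value) :: rest =>
    match List.lookup key required_details with
    | none => false  -- Python raises ValueError("Unknown key") here; excluded by Pre_
    | some req =>
      if key == "cats" || key == "trees" then
        if req ≥ value then false else contains_2 required_details rest
      else if key == "pomeranians" || key == "goldfish" then
        if req ≤ value then false else contains_2 required_details rest
      else
        if req ≠ value then false else contains_2 required_details rest

-- ===== PORT B =====
-- the set literals `low` and `high` from Source B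
def pvLow : List String := ["cats", "trees"]
def pvHigh : List String := ["pomeranians", "goldfish"]

def contains_2_alt (required_details : List (String × Int)) (details : List (String × Int)) : Bool :=
  -- `details.keys() - required_details.keys()` nonempty → raise ValueError; excluded by Pre_
  if details.any (fun kv => !((required_details.map Prod.fst).contains kv.1)) then
    false
  else
    let okLow := (details.filter (fun kv => pvLow.contains kv.1)).all
      (fun kv => match List.lookup kv.1 required_details with
                 | none => false  -- KeyError; unreachable after the validation above
                 | some r => r < kv.2)
    let okHigh := (details.filter (fun kv => pvHigh.contains kv.1)).all
      (fun kv => match List.lookup kv.1 required_details with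
                 | none => false
                 | some r => r > kv.2)
    let okEq := (details.filter (fun kv => !(pvLow.contains kv.1) && !(pvHigh.contains kv.1))).all
      (fun kv => match List.lookup kv.1 required_details with
                 | none => false
                 | some r => r == kv.2)
    okLow && okHigh && okEq

-- ===== PRECONDITION & SPEC =====
-- Pre_ excludes the inputs with a details key missing from required_details: there A raises
-- ValueError("Unknown key") unless an earlier entry already failed (then A returns False while
-- B's up-front validation raises), so neither behaviour is claimed on those inputs.
def Pre_contains_2 (required_details : List (String × Int)) (details : List (String × Int)) : Prop :=
  details.all (fun kv => (List.lookup kv.1 required_details).isSome) = true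
instance (required_details : List (String × Int)) (details : List (String × Int)) : Decidable (Pre_contains_2 required_details details) := by unfold Pre_contains_2; infer_instance

def pvWitness_contains_2 : (List (String × Int)) × (List (String × Int)) :=
  ([("children", 3), ("cats", 7), ("goldfish", 5)], [("cats", 8), ("children", 3)])

def Spec_contains_2 (required_details : List (String × Int)) (details : List (String × Int)) (out : Bool) : Prop := out = contains_2_alt required_details details
instance (required_details : List (String × Int)) (details : List (String × Int)) (out : Bool) : Decidable (Spec_contains_2 required_details details out) := by unfold Spec_contains_2; infer_instance

-- ===== CLAIM (what is proved, stated in full; the proofs are below) =====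
def Claim_equal_contains_2 : Prop := ∀ (required_details : List (String × Int)) (details : List (String × Int)), Dom_contains_2 required_details details → Pre_contains_2 required_details details → Spec_contains_2 required_details details (contains_2 required_details details)

-- ===== LEMMAS AND PROOFS =====

-- B's three filtered passes, without the validation stage (used to reason by induction).
def pvAltBody (required_details details : List (String × Int)) : Bool :=
  ((details.filter (fun kv => pvLow.contains kv.1)).all
      (fun kv => match List.lookup kv.1 required_details with
                 | none => false | some r => r < kv.2))
  && ((details.filter (fun kv => pvHigh.contains kv.1)).all
      (fun kv => match List.lookup kv.1 required_details with
                 | none => false | some r => r > kv.2))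
  && ((details.filter (fun kv => !(pvLow.contains kv.1) && !(pvHigh.contains kv.1))).all
      (fun kv => match List.lookup kv.1 required_details with
                 | none => false | some r => r == kv.2))

theorem lookup_some_mem {k : String} {v : Int} {l : List (String × Int)}
    (h : List.lookup k l = some v) : (k, v) ∈ l := by
  induction l with
  | nil => simp [List.lookup] at h
  | cons p rest ih =>
    simp only [List.lookup] at h
    by_cases hk : (k == p.1) = true
    · simp only [hk, if_true, Option.some.injEq] at h
      exact List.mem_cons.mpr (Or.inl (by obtain ⟨p1, p2⟩ := p; simp_all [beq_iff_eq.mp hk]))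
    · simp only [hk, Bool.false_eq_true, if_false] at h
      exact List.mem_cons.mpr (Or.inr (ih h))

theorem contains_2_eq_body (rd det : List (String × Int))
    (hpre : det.all (fun kv => (List.lookup kv.1 rd).isSome) = true) :
    contains_2 rd det = pvAltBody rd det := by
  induction det with
  | nil => rfl
  | cons kv rest ih =>
    obtain ⟨key, value⟩ := kv
    simp only [List.all_cons, Bool.and_eq_true] at hpre
    obtain ⟨hk, hrest⟩ := hpre
    obtain ⟨req, hreq⟩ := Option.isSome_iff_exists.mp hk
    have ihe := ih hrest
    simp only [contains_2, hreq]
    unfold pvAltBody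
    by_cases hc : (key == "cats" || key == "trees") = true
    · have hlow : pvLow.contains key = true := by
        rcases Bool.or_eq_true_iff.mp hc with h1 | h1 <;> simp [pvLow, beq_iff_eq.mp h1]
      have hhigh : pvHigh.contains key = false := by
        rcases Bool.or_eq_true_iff.mp hc with h1 | h1 <;> simp [pvHigh, beq_iff_eq.mp h1]
      simp only [hc, if_true, List.filter_cons, hlow, hhigh, Bool.not_true, Bool.not_false,
        Bool.false_and, Bool.true_and, if_true, if_false, Bool.true_and]
      simp only [List.all_cons, hreq]
      by_cases hge : req ≥ value
      · simp [hge, show ¬ req < value by omega]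
      · simp only [hge, if_false]
        rw [ihe]
        unfold pvAltBody
        simp [show req < value by omega, Bool.and_assoc]
    · by_cases hp : (key == "pomeranians" || key == "goldfish") = true
      · have hlow : pvLow.contains key = false := by
          rcases Bool.or_eq_true_iff.mp hp with h1 | h1 <;> simp [pvLow, beq_iff_eq.mp h1]
        have hhigh : pvHigh.contains key = true := by
          rcases Bool.or_eq_true_iff.mp hp with h1 | h1 <;> simp [pvHigh, beq_iff_eq.mp h1]
        simp only [hc, hp, Bool.false_eq_true, if_false, if_true, List.filter_cons, hlow, hhigh,
          Bool.not_true, Bool.not_false, Bool.and_false, Bool.true_and, if_true, if_false]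
        simp only [List.all_cons, hreq]
        by_cases hle : req ≤ value
        · simp [hle, show ¬ req > value by omega]
        · simp only [hle, if_false]
          rw [ihe]
          unfold pvAltBody
          simp [show req > value by omega, Bool.and_assoc, Bool.and_left_comm, Bool.and_comm]
      · have hlow : pvLow.contains key = false := by
          simp only [Bool.or_eq_true_iff, beq_iff_eq, not_or] at hc
          simp [pvLow, hc.1, hc.2]
        have hhigh : pvHigh.contains key = false := by
          simp only [Bool.or_eq_true_iff, beq_iff_eq, not_or] at hp
          simp [pvHigh, hp.1, hp.2]
        simp only [hc, hp, Bool.false_eq_true, if_false, List.filter_cons, hlow, hhigh,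
          Bool.not_false, Bool.and_self, if_true, if_false, Bool.true_and]
        simp only [List.all_cons, hreq]
        by_cases hne : req = value
        · simp only [hne, ne_eq, not_true_eq_false, if_false, beq_self_eq_true, Bool.true_and]
          rw [ihe]
          unfold pvAltBody
          cases (rest.filter (fun kv => pvLow.contains kv.1)).all
              (fun kv => match List.lookup kv.1 rd with | none => false | some r => r < kv.2) <;>
          cases (rest.filter (fun kv => pvHigh.contains kv.1)).all
              (fun kv => match List.lookup kv.1 rd with | none => false | some r => r > kv.2) <;>
            simp
        · simp [hne]

theorem alt_eq_body (rd det : List (String × Int))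
    (hpre : det.all (fun kv => (List.lookup kv.1 rd).isSome) = true) :
    contains_2_alt rd det = pvAltBody rd det := by
  have hval : det.any (fun kv => !((rd.map Prod.fst).contains kv.1)) = false := by
    rw [List.any_eq_false]
    intro kv hmem
    have := List.all_eq_true.mp hpre kv hmem
    obtain ⟨v, hv⟩ := Option.isSome_iff_exists.mp this
    simp only [Bool.not_eq_true', List.contains_eq_mem, decide_eq_false_iff_not, List.mem_map,
      not_exists, not_and, not_forall, Decidable.not_not]
    exact ⟨(kv.1, v), lookup_some_mem hv, rfl⟩
  simp only [contains_2_alt, hval, Bool.false_eq_true, if_false]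
  rfl

-- ===== VERDICT (by name: the statement is the Claim_ definition above) =====
theorem contains_2_spec : Claim_equal_contains_2 := by
  intro rd det _ hpre
  unfold Spec_contains_2
  rw [contains_2_eq_body rd det hpre, alt_eq_body rd det hpre]
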